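-- pv_equiv track=rewrite | github.com/KwameKert/algorithmDataStructures | smallestDifference/code/__init__.py | smallestDifference
-- ===== SOURCE A (Python) =====
-- def smallestDifference(firstList, secondList):
--     #sort arrays
--     firstList.sort()
--     secondList.sort()
--
--     #pointers
--     firstPointer= 0
--     secondPointer = 0
--     smallest = float("inf")
--     current = float("inf")
--     smallestPair = []
--
--     while firstPointer < len(firstList) and secondPointer < len(secondList):
--         #getting value from each array
--         firstNumber = firstList[firstPointer]
--         secondNumber = secondList[secondPointer]
--
--         #get current value
--         current = abs(firstNumber - secondNumber)
--
--         #if first item less than second item increase firstPointer else do otherwise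
--         if firstNumber < secondNumber:
--             firstPointer += 1
--         elif firstNumber > secondNumber:
--             secondPointer +=1
--         else:
--             return [firstNumber, secondNumber]
--
--         #recalculate the value of smallest
--         if smallest > current:
--             smallest = current
--             smallestPair = [firstNumber , secondNumber]
--
--     return smallestPair
-- ===== SOURCE B (Python) =====
-- def smallestDifference(firstList, secondList):
--     firstList.sort()
--     secondList.sort()
--     smallest = None
--     smallestPair = []
--     for f in firstList:
--         for s in secondList:
--             d = abs(f - s)
--             if smallest is None or d < smallest:
--                 smallest = d
--                 smallestPair = [f, s]
--     return smallestPair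
-- ===== Notes on version B (the rewrite author's own statement) =====
-- stated objective: simpler
-- what changed: Replaced the two-pointer merge walk (three-way comparison, early return on equality) by a plain nested loop over the two sorted lists that keeps the best pair under strict improvement in row-major order.
import Mathlib
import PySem

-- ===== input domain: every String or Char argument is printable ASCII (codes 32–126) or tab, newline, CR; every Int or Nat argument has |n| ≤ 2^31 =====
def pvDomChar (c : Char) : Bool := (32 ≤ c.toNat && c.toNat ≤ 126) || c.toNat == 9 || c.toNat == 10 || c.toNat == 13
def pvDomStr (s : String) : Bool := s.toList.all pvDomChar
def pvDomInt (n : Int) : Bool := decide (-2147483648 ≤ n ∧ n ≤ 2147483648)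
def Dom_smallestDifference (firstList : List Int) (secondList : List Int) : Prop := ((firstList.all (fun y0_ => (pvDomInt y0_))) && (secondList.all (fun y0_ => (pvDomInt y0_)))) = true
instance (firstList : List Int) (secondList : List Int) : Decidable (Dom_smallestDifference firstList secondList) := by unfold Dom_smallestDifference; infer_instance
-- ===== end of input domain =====

-- B replaces A's two-pointer merge walk by a plain nested loop over the two sorted lists keeping
-- the best pair under strict improvement in row-major order: simpler, not faster.
-- Both A and B sort both argument lists in place (the same side effect); the equivalence proved
-- here is about the return value.


-- ===== PORT A =====
-- 'smallest > current' where smallest may still be float("inf"), modelled as none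
def pvAImp (smallest : Option Int) (current : Int) : Bool :=
  match smallest with
  | none => true
  | some v => decide (current < v)

-- the while loop of A: pointers i, j; smallest = none plays float("inf"); pair = smallestPair.
-- fuel is only a structural totality guard: every iteration advances i or j, so starting the
-- loop with fuel = F.length + S.length never exhausts it before the loop condition fails.
def pvALoop (F S : List Int) : Nat → Nat → Nat → Option Int → List Int → List Int
  | 0, _, _, _, pair => pair
  | fuel+1, i, j, smallest, pair =>
    if h1 : i < F.length then
      if h2 : j < S.length then
        let f := F[i]
        let s := S[j]
        let cur := |f - s|
        if f < s then
          -- firstPointer += 1, then 'if smallest > current: smallest = current; smallestPair = [f, s]'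
          if pvAImp smallest cur then pvALoop F S fuel (i+1) j (some cur) [f, s]
          else pvALoop F S fuel (i+1) j smallest pair
        else if s < f then
          if pvAImp smallest cur then pvALoop F S fuel i (j+1) (some cur) [f, s]
          else pvALoop F S fuel i (j+1) smallest pair
        else [f, s]
      else pair
    else pair

def smallestDifference (firstList : List Int) (secondList : List Int) : List Int :=
  pvALoop (PySem.List.sorted firstList (fun x => x) false)
          (PySem.List.sorted secondList (fun x => x) false)
          ((PySem.List.sorted firstList (fun x => x) false).length +
            (PySem.List.sorted secondList (fun x => x) false).length) 0 0 none []

-- ===== PORT B =====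
-- inner-loop body of Source B: d = abs(f - s); update (smallest, smallestPair) on strict improvement
def pvBCell (f : Int) (acc : Option Int × List Int) (s : Int) : Option Int × List Int :=
  let d := |f - s|
  if acc.1.all (fun v => decide (d < v)) then (some d, [f, s]) else acc

-- one outer-loop iteration of Source B: 'for s in secondList: ...'
def pvBRow (S : List Int) (acc : Option Int × List Int) (f : Int) : Option Int × List Int :=
  S.foldl (pvBCell f) acc

def smallestDifference_alt (firstList : List Int) (secondList : List Int) : List Int :=
  let F := PySem.List.sorted firstList (fun x => x) false
  let S := PySem.List.sorted secondList (fun x => x) false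
  (F.foldl (pvBRow S) (none, [])).2

-- ===== PRECONDITION & SPEC =====
def Spec_smallestDifference (firstList : List Int) (secondList : List Int) (out : List Int) : Prop := out = smallestDifference_alt firstList secondList
instance (firstList : List Int) (secondList : List Int) (out : List Int) : Decidable (Spec_smallestDifference firstList secondList out) := by unfold Spec_smallestDifference; infer_instance

-- ===== CLAIM (what is proved, stated in full; the proofs are below) =====
def Claim_equal_smallestDifference : Prop := ∀ (firstList : List Int) (secondList : List Int), Dom_smallestDifference firstList secondList → Spec_smallestDifference firstList secondList (smallestDifference firstList secondList)

-- ===== LEMMAS AND PROOFS =====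

theorem pvAImp_eq_all (sm : Option Int) (d : Int) :
    pvAImp sm d = sm.all (fun v => decide (d < v)) := by
  cases sm <;> rfl

theorem pvAImp_true_some (v d : Int) (h : pvAImp (some v) d = true) : d < v := by
  simpa [pvAImp] using h

theorem pvAImp_false_elim (sm : Option Int) (d : Int) (h : ¬ pvAImp sm d = true) :
    ∃ v, sm = some v ∧ v ≤ d := by
  cases sm with
  | none => simp [pvAImp] at h
  | some v => exact ⟨v, rfl, le_of_not_gt (by simpa [pvAImp] using h)⟩

-- evaluating one cell when the improvement test succeeds
theorem pvBCell_imp (f s : Int) (acc : Option Int × List Int)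
    (h : pvAImp acc.1 (|f - s|) = true) :
    pvBCell f acc s = (some (|f - s|), [f, s]) := by
  rw [pvAImp_eq_all] at h
  simp only [pvBCell]
  rw [if_pos h]

-- a cell whose difference does not beat the stored minimum leaves the accumulator unchanged
theorem pvBCell_noimp (f s : Int) (acc : Option Int × List Int) (v : Int)
    (h1 : acc.1 = some v) (h2 : v ≤ |f - s|) : pvBCell f acc s = acc := by
  simp only [pvBCell, h1, Option.all_some]
  rw [if_neg (by simpa using not_lt.mpr h2)]

-- a run of non-improving cells is a no-op
theorem pvRow_noimp (l : List Int) (f : Int) (acc : Option Int × List Int) (v : Int)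
    (h1 : acc.1 = some v) (h2 : ∀ s ∈ l, v ≤ |f - s|) : l.foldl (pvBCell f) acc = acc := by
  induction l with
  | nil => rfl
  | cons s t ih =>
    have hc : pvBCell f acc s = acc := pvBCell_noimp f s acc v h1 (h2 s List.mem_cons_self)
    simpa [List.foldl_cons, hc] using ih (fun s' hs' => h2 s' (List.mem_cons_of_mem _ hs'))

-- whole rows of non-improving cells are a no-op
theorem pvRows_noimp (L S : List Int) (acc : Option Int × List Int) (v : Int)
    (h1 : acc.1 = some v) (h2 : ∀ f ∈ L, ∀ s ∈ S, v ≤ |f - s|) :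
    L.foldl (pvBRow S) acc = acc := by
  induction L with
  | nil => rfl
  | cons f t ih =>
    have hr : pvBRow S acc f = acc :=
      pvRow_noimp S f acc v h1 (h2 f List.mem_cons_self)
    simpa [List.foldl_cons, hr] using ih (fun f' hf' => h2 f' (List.mem_cons_of_mem _ hf'))

theorem pvRows_nilS (L : List Int) (acc : Option Int × List Int) :
    L.foldl (pvBRow []) acc = acc := by
  induction L with
  | nil => rfl
  | cons f t ih => simpa [List.foldl_cons, pvBRow] using ih

-- index description of membership in a prefix / suffix
theorem pv_mem_take (S : List Int) (j : Nat) (s : Int) (hs : s ∈ S.take j) :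
    ∃ b, ∃ (hbl : b < S.length), b < j ∧ s = S[b] := by
  obtain ⟨b, hb, hgot⟩ := List.mem_iff_getElem.mp hs
  have hb' := hb
  rw [List.length_take] at hb'
  refine ⟨b, by omega, by omega, ?_⟩
  rw [← hgot]
  simp [List.getElem_take]

theorem pv_mem_drop (L : List Int) (i : Nat) (x : Int) (hx : x ∈ L.drop i) :
    ∃ a, ∃ (hal : a < L.length), i ≤ a ∧ x = L[a] := by
  obtain ⟨k, hk, hgot⟩ := List.mem_iff_getElem.mp hx
  have hk' := hk
  rw [List.length_drop] at hk'
  refine ⟨i + k, by omega, by omega, ?_⟩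
  rw [← hgot]
  simp [List.getElem_drop]

-- the first j cells of a row are a no-op when nothing to the left of column j can improve
theorem pv_prefix_noop (S : List Int) (j : Nat) (f : Int) (acc : Option Int × List Int) (v : Int)
    (h1 : acc.1 = some v)
    (hb : ∀ b, b < j → ∀ (hbl : b < S.length), v ≤ |f - S[b]|) :
    (S.take j).foldl (pvBCell f) acc = acc := by
  apply pvRow_noimp _ f acc v h1
  intro s hs
  obtain ⟨b, hbl, hbj, rfl⟩ := pv_mem_take S j s hs
  exact hb b hbj hbl

theorem pv_suffix_noop (S : List Int) (j : Nat) (f : Int) (acc : Option Int × List Int) (v : Int)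
    (h1 : acc.1 = some v)
    (hb : ∀ b, j + 1 ≤ b → ∀ (hbl : b < S.length), v ≤ |f - S[b]|) :
    (S.drop (j+1)).foldl (pvBCell f) acc = acc := by
  apply pvRow_noimp _ f acc v h1
  intro s hs
  obtain ⟨b, hbl, hbj, rfl⟩ := pv_mem_drop S (j+1) s hs
  exact hb b hbj hbl

-- split one row fold at column j
theorem pvRow_split (S : List Int) (j : Nat) (f : Int) (acc : Option Int × List Int) :
    pvBRow S acc f = (S.drop j).foldl (pvBCell f) ((S.take j).foldl (pvBCell f) acc) := by
  unfold pvBRow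
  conv_lhs => rw [← List.take_append_drop j S]
  rw [List.foldl_append]

-- main invariant: from state (i, j, sm, pr), A's walk returns the same pair as B's fold of the
-- remaining rows (with full rows), provided no cell in columns < j of rows ≥ i can improve sm
theorem pvLoop_eq (F S : List Int)
    (hF : ∀ (p q : Nat) (hpq : p ≤ q) (hq : q < F.length), F[p]'(Nat.lt_of_le_of_lt hpq hq) ≤ F[q])
    (hS : ∀ (p q : Nat) (hpq : p ≤ q) (hq : q < S.length), S[p]'(Nat.lt_of_le_of_lt hpq hq) ≤ S[q]) :
    ∀ (n i j : Nat) (sm : Option Int) (pr : List Int),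
      (F.length - i) + (S.length - j) ≤ n →
      (∀ v, sm = some v → 1 ≤ v) →
      (∀ a, i ≤ a → ∀ (hal : a < F.length), ∀ b, b < j → ∀ (hbl : b < S.length),
        ∃ v, sm = some v ∧ v ≤ |F[a] - S[b]|) →
      pvALoop F S n i j sm pr = ((F.drop i).foldl (pvBRow S) (sm, pr)).2 := by
  intro n
  induction n with
  | zero =>
    intro i j sm pr hn hsm hskip
    have hi : F.length ≤ i := by omega
    rw [List.drop_eq_nil_of_le hi]
    rfl
  | succ n ih =>
    intro i j sm pr hn hsm hskip
    by_cases h1 : i < F.length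
    · by_cases h2 : j < S.length
      · -- loop body runs
        rw [pvALoop]
        simp only [dif_pos h1, dif_pos h2]
        have hdropF : F.drop i = F[i] :: F.drop (i+1) := by
          rw [List.drop_eq_getElem_cons h1]
        have hpre : ∀ (acc : Option Int × List Int) (w : Int), acc.1 = some w →
            (∀ a, i ≤ a → ∀ (hal : a < F.length), ∀ b, b < j → ∀ (hbl : b < S.length),
              w ≤ |F[a] - S[b]|) →
            (S.take j).foldl (pvBCell (F[i])) acc = acc := by
          intro acc w hw hbnd
          exact pv_prefix_noop S j (F[i]) acc w hw (fun b hbj hbl => hbnd i le_rfl h1 b hbj hbl)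
        -- from hskip, a uniform bound for the stored minimum (when j > 0)
        have hSdrop : S.drop j = S[j] :: S.drop (j+1) := by
          rw [List.drop_eq_getElem_cons h2]
        by_cases hfs : F[i] < S[j]
        · -- first branch: advance firstPointer
          rw [if_pos hfs]
          have hcur : |F[i] - S[j]| = S[j] - F[i] := by
            rw [abs_of_neg (by omega)]; ring
          have hsuffbnd : ∀ b, j + 1 ≤ b → ∀ (hbl : b < S.length), |F[i] - S[j]| ≤ |F[i] - S[b]| := by
            intro b hbj hbl
            have hmono : S[j] ≤ S[b] := hS j b (by omega) hbl
            have habs : S[b] - F[i] ≤ |F[i] - S[b]| := by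
              rw [abs_sub_comm]; exact le_abs_self _
            omega
          -- prefix of row i is a no-op from (sm, pr)
          have hpre1 : (S.take j).foldl (pvBCell (F[i])) (sm, pr) = (sm, pr) := by
            rcases Nat.eq_zero_or_pos j with hj | hj
            · subst hj; simp
            · obtain ⟨v, hv, _⟩ := hskip i le_rfl h1 0 hj (by omega)
              apply hpre (sm, pr) v hv
              intro a ha hal b hbj hbl
              obtain ⟨v', hv', bd⟩ := hskip a ha hal b hbj hbl
              have hvv : v = v' := by rw [hv] at hv'; simpa using hv'
              omega
          by_cases hc : pvAImp sm (|F[i] - S[j]|) = true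
          · rw [if_pos hc]
            have hrow : pvBRow S (sm, pr) (F[i]) = (some (|F[i] - S[j]|), [F[i], S[j]]) := by
              rw [pvRow_split S j, hpre1, hSdrop, List.foldl_cons,
                  pvBCell_imp (F[i]) (S[j]) (sm, pr) hc]
              exact pv_suffix_noop S j (F[i]) _ (|F[i] - S[j]|) rfl hsuffbnd
            rw [hdropF, List.foldl_cons, hrow]
            apply ih (i+1) j (some (|F[i] - S[j]|)) [F[i], S[j]] (by omega)
            · intro v hv
              have : |F[i] - S[j]| = v := by simpa using hv
              omega
            · intro a ha hal b hbj hbl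
              obtain ⟨v, hv, bd⟩ := hskip a (by omega) hal b hbj hbl
              rw [hv] at hc
              have := pvAImp_true_some v (|F[i] - S[j]|) hc
              exact ⟨|F[i] - S[j]|, rfl, by omega⟩
          · rw [if_neg hc]
            obtain ⟨v, hsmv, hvcur⟩ := pvAImp_false_elim sm (|F[i] - S[j]|) hc
            have hrow : pvBRow S (sm, pr) (F[i]) = (sm, pr) := by
              rw [pvRow_split S j, hpre1, hSdrop, List.foldl_cons,
                  pvBCell_noimp (F[i]) (S[j]) (sm, pr) v hsmv hvcur]
              exact pv_suffix_noop S j (F[i]) _ v hsmv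
                (fun b hbj hbl => le_trans hvcur (hsuffbnd b hbj hbl))
            rw [hdropF, List.foldl_cons, hrow]
            exact ih (i+1) j sm pr (by omega) hsm
              (fun a ha hal b hbj hbl => hskip a (by omega) hal b hbj hbl)
        · by_cases hsf : S[j] < F[i]
          · -- second branch: advance secondPointer
            rw [if_neg hfs, if_pos hsf]
            have hcur : |F[i] - S[j]| = F[i] - S[j] := by
              rw [abs_of_nonneg (by omega)]
            have hcolbnd : ∀ a, i ≤ a → ∀ (hal : a < F.length), |F[i] - S[j]| ≤ |F[a] - S[j]| := by
              intro a ha hal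
              have hmono : F[i] ≤ F[a] := hF i a ha hal
              have habs : F[a] - S[j] ≤ |F[a] - S[j]| := le_abs_self _
              omega
            have hpre1 : (S.take j).foldl (pvBCell (F[i])) (sm, pr) = (sm, pr) := by
              rcases Nat.eq_zero_or_pos j with hj | hj
              · subst hj; simp
              · obtain ⟨v, hv, _⟩ := hskip i le_rfl h1 0 hj (by omega)
                apply hpre (sm, pr) v hv
                intro a ha hal b hbj hbl
                obtain ⟨v', hv', bd⟩ := hskip a ha hal b hbj hbl
                have hvv : v = v' := by rw [hv] at hv'; simpa using hv'
                omega
            by_cases hc : pvAImp sm (|F[i] - S[j]|) = true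
            · rw [if_pos hc]
              -- after the update the first j+1 columns can no longer improve
              have hskip' : ∀ a, i ≤ a → ∀ (hal : a < F.length), ∀ b, b < j + 1 →
                  ∀ (hbl : b < S.length),
                  ∃ v, (some (|F[i] - S[j]|) : Option Int) = some v ∧ v ≤ |F[a] - S[b]| := by
                intro a ha hal b hbj hbl
                refine ⟨|F[i] - S[j]|, rfl, ?_⟩
                by_cases hbj' : b < j
                · obtain ⟨v, hv, bd⟩ := hskip a ha hal b hbj' hbl
                  rw [hv] at hc
                  have := pvAImp_true_some v (|F[i] - S[j]|) hc
                  omega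
                · have hbj2 : b = j := by omega
                  subst hbj2
                  exact hcolbnd a ha hal
              have hrowEq : pvBRow S (sm, pr) (F[i]) =
                  pvBRow S (some (|F[i] - S[j]|), [F[i], S[j]]) (F[i]) := by
                rw [pvRow_split S j (F[i]) (sm, pr),
                    pvRow_split S j (F[i]) (some (|F[i] - S[j]|), [F[i], S[j]])]
                rw [hpre1]
                rw [hpre (some (|F[i] - S[j]|), [F[i], S[j]]) (|F[i] - S[j]|) rfl
                  (fun a ha hal b hbj hbl => by
                    obtain ⟨v, hv, bd⟩ := hskip' a ha hal b (by omega) hbl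
                    have : |F[i] - S[j]| = v := by simpa using hv
                    omega)]
                rw [hSdrop, List.foldl_cons, List.foldl_cons,
                    pvBCell_imp (F[i]) (S[j]) (sm, pr) hc,
                    pvBCell_noimp (F[i]) (S[j]) (some (|F[i] - S[j]|), [F[i], S[j]])
                      (|F[i] - S[j]|) rfl le_rfl]
              rw [hdropF, List.foldl_cons, hrowEq, ← List.foldl_cons, ← hdropF]
              apply ih i (j+1) (some (|F[i] - S[j]|)) [F[i], S[j]] (by omega)
              · intro v hv
                have : |F[i] - S[j]| = v := by simpa using hv
                omega
              · exact hskip'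
            · rw [if_neg hc]
              obtain ⟨v, hsmv, hvcur⟩ := pvAImp_false_elim sm (|F[i] - S[j]|) hc
              have hskip' : ∀ a, i ≤ a → ∀ (hal : a < F.length), ∀ b, b < j + 1 →
                  ∀ (hbl : b < S.length), ∃ v', sm = some v' ∧ v' ≤ |F[a] - S[b]| := by
                intro a ha hal b hbj hbl
                by_cases hbj' : b < j
                · exact hskip a ha hal b hbj' hbl
                · have hbj2 : b = j := by omega
                  subst hbj2
                  refine ⟨v, hsmv, ?_⟩
                  have := hcolbnd a ha hal
                  omega
              have hrowEq : pvBRow S (sm, pr) (F[i]) = pvBRow S (sm, pr) (F[i]) := rfl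
              rw [hdropF, List.foldl_cons, ← List.foldl_cons, ← hdropF]
              exact ih i (j+1) sm pr (by omega) hsm hskip'
          · -- equal elements: early return [f, s]
            rw [if_neg hfs, if_neg hsf]
            have hfe : F[i] = S[j] := by omega
            have hcur0 : |F[i] - S[j]| = 0 := by rw [hfe]; simp
            have hc : pvAImp sm (|F[i] - S[j]|) = true := by
              cases hsme : sm with
              | none => rfl
              | some v =>
                have h1v := hsm v hsme
                simp [pvAImp, hcur0]
                omega
            have hpre1 : (S.take j).foldl (pvBCell (F[i])) (sm, pr) = (sm, pr) := by
              rcases Nat.eq_zero_or_pos j with hj | hj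
              · subst hj; simp
              · obtain ⟨v, hv, _⟩ := hskip i le_rfl h1 0 hj (by omega)
                apply hpre (sm, pr) v hv
                intro a ha hal b hbj hbl
                obtain ⟨v', hv', bd⟩ := hskip a ha hal b hbj hbl
                have hvv : v = v' := by rw [hv] at hv'; simpa using hv'
                omega
            have hrow : pvBRow S (sm, pr) (F[i]) = (some 0, [F[i], S[j]]) := by
              rw [pvRow_split S j, hpre1, hSdrop, List.foldl_cons,
                  pvBCell_imp (F[i]) (S[j]) (sm, pr) hc, hcur0]
              exact pv_suffix_noop S j (F[i]) _ 0 rfl (fun b hbj hbl => abs_nonneg _)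
            have hrows : (F.drop (i+1)).foldl (pvBRow S) (some 0, [F[i], S[j]]) =
                (some 0, [F[i], S[j]]) := by
              apply pvRows_noimp _ S _ 0 rfl
              intro f' hf' s' hs'
              exact abs_nonneg _
            rw [hdropF, List.foldl_cons, hrow, hrows]
      · -- j exhausted: the remaining rows cannot improve
        rw [pvALoop]
        rw [dif_pos h1, dif_neg h2]
        cases hSnil : S with
        | nil => rw [pvRows_nilS]
        | cons s0 t =>
          have hSlen : 0 < S.length := by rw [hSnil]; simp
          obtain ⟨v, hv, _⟩ := hskip i le_rfl h1 0 (by omega) (by omega)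
          rw [← hSnil]
          rw [pvRows_noimp (F.drop i) S (sm, pr) v hv ?_]
          intro f' hf' s' hs'
          obtain ⟨a, hal, ha, rfl⟩ := pv_mem_drop F i f' hf'
          obtain ⟨b, hbl, hbj, rfl⟩ := pv_mem_take S S.length s' (by simpa using hs')
          obtain ⟨v', hv', bd⟩ := hskip a ha hal b (by omega) hbl
          have hvv : v = v' := by rw [hv] at hv'; simpa using hv'
          omega
    · -- i exhausted
      rw [pvALoop]
      rw [dif_neg h1]
      rw [List.drop_eq_nil_of_le (by omega)]
      rfl

-- ===== VERDICT (by name: the statement is the Claim_ definition above) =====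
theorem smallestDifference_spec : Claim_equal_smallestDifference := by
  intro firstList secondList _
  unfold Spec_smallestDifference smallestDifference smallestDifference_alt
  have hF : ∀ (p q : Nat) (hpq : p ≤ q)
      (hq : q < (PySem.List.sorted firstList (fun x => x) false).length),
      (PySem.List.sorted firstList (fun x => x) false)[p]'(Nat.lt_of_le_of_lt hpq hq) ≤
        (PySem.List.sorted firstList (fun x => x) false)[q] := by
    intro p q hpq hq
    exact PySem.List.sorted_id_getElem_mono _ hpq hq
  have hS : ∀ (p q : Nat) (hpq : p ≤ q)
      (hq : q < (PySem.List.sorted secondList (fun x => x) false).length),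
      (PySem.List.sorted secondList (fun x => x) false)[p]'(Nat.lt_of_le_of_lt hpq hq) ≤
        (PySem.List.sorted secondList (fun x => x) false)[q] := by
    intro p q hpq hq
    exact PySem.List.sorted_id_getElem_mono _ hpq hq
  have := pvLoop_eq (PySem.List.sorted firstList (fun x => x) false)
    (PySem.List.sorted secondList (fun x => x) false) hF hS
    ((PySem.List.sorted firstList (fun x => x) false).length +
      (PySem.List.sorted secondList (fun x => x) false).length) 0 0 none []
    (by omega) (by intro v hv; cases hv)
    (by intro a ha hal b hb hbl; omega)
  simpa using this
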